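-- pv_equiv track=rewrite | github.com/jeeveesee/Bioinformatics | BI2/Wk4/Wk4_7_Spectral_Convolution.py | spectral_convolution
-- ===== SOURCE A (Python) =====
-- def spectral_convolution(experimental_spectrum):
--     """
--     Finds the spectral convolution of a given experimental spectrum
--
--     Parameters:
--         experimental_spectrum -> list of integers representing experimental spectrum masses
--
--     Returns:
--         list of amino acid masses in the convolutional spectrum
--     """
--     experimental_spectrum = sorted(experimental_spectrum)
--     experimental_spectrum_conv = experimental_spectrum.copy()
--     spectrum = []
--
--     for mass in experimental_spectrum:
--         for mass_conv in experimental_spectrum_conv: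
--             if (mass - mass_conv) > 0:
--                 spectrum.append(mass - mass_conv)
--     return sorted(spectrum)
-- ===== SOURCE B (Python) =====
-- def spectral_convolution(experimental_spectrum):
--     counts = {}
--     for m in experimental_spectrum:
--         counts[m] = counts.get(m, 0) + 1
--     vals = sorted(counts)
--     result = []
--     for u in vals:
--         for v in vals:
--             if v < u:
--                 result.extend([u - v] * (counts[u] * counts[v]))
--     return sorted(result)
-- ===== Notes on version B (the rewrite author's own statement) =====
-- stated objective: alternative
-- what changed: B builds a frequency table of the masses and loops over pairs of sorted distinct values, emitting each positive difference count(u)*count(v) times, instead of A's flat position-by-position double loop over the sorted list.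
import Mathlib
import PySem

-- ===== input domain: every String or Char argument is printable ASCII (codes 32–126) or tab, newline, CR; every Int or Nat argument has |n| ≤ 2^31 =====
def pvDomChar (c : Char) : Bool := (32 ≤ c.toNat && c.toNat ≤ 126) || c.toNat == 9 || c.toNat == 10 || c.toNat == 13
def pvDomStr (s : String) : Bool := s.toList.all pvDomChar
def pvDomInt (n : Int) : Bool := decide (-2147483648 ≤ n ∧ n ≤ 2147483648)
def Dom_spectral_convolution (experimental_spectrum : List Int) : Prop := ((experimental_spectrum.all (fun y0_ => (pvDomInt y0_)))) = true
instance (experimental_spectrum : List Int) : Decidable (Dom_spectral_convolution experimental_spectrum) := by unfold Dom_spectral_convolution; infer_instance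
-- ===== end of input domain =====

-- B replaces A's flat position-by-position n² double loop with a frequency table over the
-- distinct mass values, emitting each positive difference of distinct values count(u)*count(v) times.

-- ===== PORT A =====
def spectral_convolution (experimental_spectrum : List Int) : List Int :=
  let es := PySem.List.sorted experimental_spectrum (fun x => x) false
  let conv := es  -- .copy()
  let spectrum := es.foldl (fun acc mass =>
    conv.foldl (fun acc mass_conv =>
      if mass - mass_conv > 0 then acc ++ [mass - mass_conv] else acc) acc) []
  PySem.List.sorted spectrum (fun x => x) false

-- ===== PORT B =====
def spectral_convolution_alt (experimental_spectrum : List Int) : List Int :=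
  let counts : PySem.Dict Int Int :=
    experimental_spectrum.foldl (fun d m => d.insert m (d.getD m 0 + 1)) PySem.Dict.empty
  let vals := PySem.List.sorted counts.keys (fun x => x) false
  let result := vals.foldl (fun acc u =>
    vals.foldl (fun acc v =>
      if v < u then acc ++ List.replicate ((counts.getD u 0) * (counts.getD v 0)).toNat (u - v)
      else acc) acc) []
  PySem.List.sorted result (fun x => x) false

-- ===== PRECONDITION & SPEC =====
def Spec_spectral_convolution (experimental_spectrum : List Int) (out : List Int) : Prop := out = spectral_convolution_alt experimental_spectrum
instance (experimental_spectrum : List Int) (out : List Int) : Decidable (Spec_spectral_convolution experimental_spectrum out) := by unfold Spec_spectral_convolution; infer_instance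

-- ===== CLAIM (what is proved, stated in full; the proofs are below) =====
def Claim_equal_spectral_convolution : Prop := ∀ (experimental_spectrum : List Int), Dom_spectral_convolution experimental_spectrum → Spec_spectral_convolution experimental_spectrum (spectral_convolution experimental_spectrum)

-- ===== LEMMAS AND PROOFS =====

-- indicator sum over a nodup list: only the term at t (if present) survives
lemma sum_map_ite_eq (vs : List Int) (t : Int) (h : Int → Nat) (hnd : vs.Nodup) :
    (vs.map (fun v => if v = t then h v else 0)).sum = if t ∈ vs then h t else 0 := by
  induction vs with
  | nil => simp
  | cons a rest ih =>
    simp only [List.nodup_cons] at hnd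
    simp only [List.map_cons, List.sum_cons, List.mem_cons, ih hnd.2]
    by_cases ha : a = t
    · subst ha
      simp [hnd.1]
    · simp [ha, Ne.symm ha]

-- a sum over a list, grouped by distinct values: Σ_{x∈l} g x = Σ_{u∈vs} count u l * g u
lemma sum_map_group (vs : List Int) (g : Int → Nat) :
    ∀ l : List Int, vs.Nodup → (∀ x ∈ l, x ∈ vs) →
    (l.map g).sum = (vs.map (fun u => l.count u * g u)).sum := by
  induction vs with
  | nil =>
    intro l _ hm
    cases l with
    | nil => simp
    | cons x xs => exact absurd (hm x (by simp)) (by simp)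
  | cons u rest ih =>
    intro l hnd hm
    simp only [List.nodup_cons] at hnd
    have hperm : ((l.filter (· == u)) ++ l.filter (fun x => !(x == u))).Perm l :=
      List.filter_append_perm _ l
    have hsum : (l.map g).sum = ((l.filter (· == u)).map g).sum + ((l.filter (fun x => !(x == u))).map g).sum := by
      have := (hperm.map g).sum_eq
      simp only [List.map_append, List.sum_append] at this
      omega
    have h1 : ((l.filter (· == u)).map g).sum = l.count u * g u := by
      have hall : (l.filter (· == u)).map g = List.replicate ((l.filter (· == u)).map g).length (g u) := by
        apply List.eq_replicate_of_mem
        intro b hb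
        obtain ⟨x, hx, rfl⟩ := List.mem_map.mp hb
        have := (List.mem_filter.mp hx).2
        simp at this
        rw [this]
      rw [hall, List.sum_replicate, List.length_map, List.count]
      simp [List.countP_eq_length_filter, smul_eq_mul]
    have h2 : ((l.filter (fun x => !(x == u))).map g).sum
        = (rest.map (fun v => (l.filter (fun x => !(x == u))).count v * g v)).sum := by
      apply ih _ hnd.2
      intro x hx
      have hx' := List.mem_filter.mp hx
      have := hm x hx'.1
      simp only [List.mem_cons] at this
      rcases this with h | h
      · simp [h] at hx'
      · exact h
    have h3 : rest.map (fun v => (l.filter (fun x => !(x == u))).count v * g v)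
        = rest.map (fun v => l.count v * g v) := by
      apply List.map_congr_left
      intro v hv
      have : (l.filter (fun x => !(x == u))).count v = l.count v := by
        apply List.count_filter
        simp
        intro h; exact hnd.1 (h ▸ hv)
      rw [this]
    rw [hsum, h1, h2, h3]
    simp

-- A's double loop, flattened to a flatMap
lemma A_flat (es : List Int) :
    es.foldl (fun acc mass =>
      es.foldl (fun acc mc => if mass - mc > 0 then acc ++ [mass - mc] else acc) acc) []
    = es.flatMap (fun x => (es.filter (fun y => decide (x - y > 0))).map (fun y => x - y)) := by
  have h1 : ∀ (mass : Int) (acc : List Int),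
      es.foldl (fun acc mc => if mass - mc > 0 then acc ++ [mass - mc] else acc) acc
      = acc ++ (es.filter (fun y => decide (mass - y > 0))).map (fun y => mass - y) := by
    intro mass acc
    have := PySem.List.foldl_append_if (fun y => decide (mass - y > 0)) (fun y => mass - y) es acc
    simpa using this
  simp only [h1]
  exact PySem.List.foldl_append_eq_flatMap _ es []

-- B's double loop, flattened to a nested flatMap
lemma B_flat (vals : List Int) (c : Int → Nat) :
    vals.foldl (fun acc u =>
      vals.foldl (fun acc v =>
        if v < u then acc ++ List.replicate (c u * c v) (u - v) else acc) acc) []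
    = vals.flatMap (fun u => vals.flatMap (fun v =>
        if v < u then List.replicate (c u * c v) (u - v) else [])) := by
  have h1 : ∀ (u : Int) (acc : List Int),
      vals.foldl (fun acc v => if v < u then acc ++ List.replicate (c u * c v) (u - v) else acc) acc
      = acc ++ vals.flatMap (fun v => if v < u then List.replicate (c u * c v) (u - v) else []) := by
    intro u acc
    have h2 : (fun (acc : List Int) v => if v < u then acc ++ List.replicate (c u * c v) (u - v) else acc)
        = (fun acc v => acc ++ if v < u then List.replicate (c u * c v) (u - v) else []) := by
      funext acc v; split <;> simp
    rw [h2]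
    exact PySem.List.foldl_append_eq_flatMap _ vals acc
  simp only [h1]
  exact PySem.List.foldl_append_eq_flatMap _ vals []

-- the two collected multisets coincide (count each value)
lemma main_perm (es : List Int) :
    (es.flatMap (fun x => (es.filter (fun y => decide (x - y > 0))).map (fun y => x - y))).Perm
    ((PySem.List.sorted (PySem.Set.ofList es) (fun x => x) false).flatMap (fun u =>
      (PySem.List.sorted (PySem.Set.ofList es) (fun x => x) false).flatMap (fun v =>
        if v < u then List.replicate (es.count u * es.count v) (u - v) else []))) := by
  set vals := PySem.List.sorted (PySem.Set.ofList es) (fun x => x) false with hvals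
  have hndv : vals.Nodup :=
    ((PySem.List.sorted_perm (PySem.Set.ofList es) (fun x => x) false).nodup_iff).mpr
      (PySem.Set.nodup_ofList es)
  have hmemv : ∀ x, x ∈ vals ↔ x ∈ es := by
    intro x
    rw [hvals, PySem.List.mem_sorted, PySem.Set.mem_ofList]
  rw [List.perm_iff_count]
  intro a
  rw [List.count_flatMap, List.count_flatMap]
  by_cases ha : 0 < a
  · have hL : es.map (List.count a ∘ fun x => (es.filter (fun y => decide (x - y > 0))).map (fun y => x - y))
        = es.map (fun x => es.count (x - a)) := by
      apply List.map_congr_left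
      intro x _
      show List.count a ((es.filter (fun y => decide (x - y > 0))).map (fun y => x - y)) = _
      have hinj : Function.Injective (fun y : Int => x - y) := by
        intro p q hpq; simp at hpq; omega
      have h1 := List.count_map_of_injective (es.filter (fun y => decide (x - y > 0))) (fun y => x - y) hinj (x - a)
      simp only [sub_sub_cancel] at h1
      rw [h1, List.count_filter (by simp; omega)]
    have hR : vals.map (List.count a ∘ fun u => vals.flatMap (fun v =>
          if v < u then List.replicate (es.count u * es.count v) (u - v) else []))
        = vals.map (fun u => es.count u * es.count (u - a)) := by
      apply List.map_congr_left
      intro u _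
      show List.count a (vals.flatMap fun v => _) = _
      rw [List.count_flatMap]
      have : vals.map (List.count a ∘ fun v => if v < u then List.replicate (es.count u * es.count v) (u - v) else [])
          = vals.map (fun v => if v = u - a then es.count u * es.count v else 0) := by
        apply List.map_congr_left
        intro v _
        show List.count a (if v < u then List.replicate (es.count u * es.count v) (u - v) else []) = _
        by_cases hv : v = u - a
        · subst hv
          rw [if_pos (by omega)]
          simp
        · rw [if_neg hv]
          split
          · rw [List.count_replicate, if_neg (show ¬((u - v == a) = true) by simp; omega)]
          · simp
      rw [this, sum_map_ite_eq vals (u - a) (fun v => es.count u * es.count v) hndv]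
      by_cases hmem : u - a ∈ vals
      · simp [hmem]
      · have : es.count (u - a) = 0 := List.count_eq_zero.mpr (fun h => hmem ((hmemv _).mpr h))
        simp [hmem, this]
    rw [hL, hR]
    exact sum_map_group vals (fun x => es.count (x - a)) es hndv (fun x hx => (hmemv x).mpr hx)
  · rw [List.sum_eq_zero, List.sum_eq_zero]
    · intro n hn
      obtain ⟨u, _, rfl⟩ := List.mem_map.mp hn
      apply List.count_eq_zero.mpr
      intro hmem
      obtain ⟨v, _, hv⟩ := List.mem_flatMap.mp hmem
      by_cases h : v < u
      · rw [if_pos h] at hv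
        have := List.eq_of_mem_replicate hv
        omega
      · rw [if_neg h] at hv; exact absurd hv (List.not_mem_nil)
    · intro n hn
      obtain ⟨x, _, rfl⟩ := List.mem_map.mp hn
      apply List.count_eq_zero.mpr
      intro hmem
      obtain ⟨y, hy, hxy⟩ := List.mem_map.mp hmem
      have := (List.mem_filter.mp hy).2
      simp at this
      omega

-- ===== VERDICT (by name: the statement is the Claim_ definition above) =====
theorem spectral_convolution_spec : Claim_equal_spectral_convolution := by
  intro es _
  show _ = _
  unfold spectral_convolution spectral_convolution_alt
  simp only [PySem.Dict.foldl_insert_getD_add_one_eq_counter, PySem.Dict.getD_counter,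
    PySem.Dict.keys_counter]
  have hcast : ∀ u v : Int, ((es.count u : Int) * (es.count v : Int)).toNat = es.count u * es.count v := by
    intro u v
    rw [← Nat.cast_mul, Int.toNat_natCast]
  simp only [hcast]
  set es' := PySem.List.sorted es (fun x => x) false with hes'
  have hperm : es'.Perm es := PySem.List.sorted_perm es (fun x => x) false
  rw [A_flat es', B_flat]
  rw [PySem.List.sorted_id_eq_sorted_id_iff_perm]
  -- replace counts over es' by counts over es, and sorted (ofList es') by sorted (ofList es)
  have hcnt : ∀ u : Int, es'.count u = es.count u := fun u => hperm.count_eq u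
  have hset : PySem.List.sorted (PySem.Set.ofList es') (fun x => x) false
      = PySem.List.sorted (PySem.Set.ofList es) (fun x => x) false := by
    apply PySem.List.sorted_eq_sorted_of_perm _ _ _ (fun a b h => h)
    apply (List.perm_ext_iff_of_nodup (PySem.Set.nodup_ofList es') (PySem.Set.nodup_ofList es)).mpr
    intro a
    rw [PySem.Set.mem_ofList, PySem.Set.mem_ofList]
    exact hperm.mem_iff
  have := main_perm es'
  simp only [hcnt, hset] at this
  exact this
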